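-- pv_equiv track=rewrite | github.com/pabloAymarM/PythonClasses | obiOlimpic/construtora.py | calcular_fases
-- ===== SOURCE A (Python) =====
-- def calcular_fases(N, alturas):
--     fases = 0
--     while True:
--         max_altura = max(alturas)
--         min_altura = min(alturas)
--         if max_altura == min_altura:
--             break
--         fases += 1
--         for i in range(N):
--             if alturas[i] < max_altura:
--                 alturas[i] += 1
--     return fases
-- ===== SOURCE B (Python) =====
-- def calcular_fases(N, alturas):
--     # Each phase raises every height below the maximum by 1, so the minimum
--     # rises by 1 per phase until it meets the (unchanged) maximum.
--     # Note: unlike A, B does not mutate alturas in place.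
--     return max(alturas) - min(alturas)
-- ===== Notes on version B (the rewrite author's own statement) =====
-- stated objective: faster
-- what changed: Replaced the phase-by-phase simulation (rescan max/min and increment every below-max height each phase) with the closed form max(alturas) - min(alturas), since each phase raises the minimum by exactly 1 and leaves the maximum unchanged; Pre_ is exactly where A returns (nonempty, and N <= len with all heights past index N maximal, or all heights equal), the rest being A's ValueError/IndexError or an infinite loop.
import Mathlib
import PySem

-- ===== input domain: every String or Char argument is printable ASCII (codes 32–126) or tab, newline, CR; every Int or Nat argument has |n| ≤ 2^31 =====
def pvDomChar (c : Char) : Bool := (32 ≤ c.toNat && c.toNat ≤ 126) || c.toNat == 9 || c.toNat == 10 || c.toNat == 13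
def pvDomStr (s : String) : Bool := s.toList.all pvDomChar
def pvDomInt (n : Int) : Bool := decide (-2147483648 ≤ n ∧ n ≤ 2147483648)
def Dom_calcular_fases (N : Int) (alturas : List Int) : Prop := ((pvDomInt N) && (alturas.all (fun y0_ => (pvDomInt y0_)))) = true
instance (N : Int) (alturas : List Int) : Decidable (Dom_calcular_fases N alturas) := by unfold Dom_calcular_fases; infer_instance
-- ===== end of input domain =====

-- B replaces A's phase-by-phase simulation with the closed form max(alturas) - min(alturas)
-- (asymptotically faster); A mutates alturas in place, B does not — the equivalence proved
-- here is about the return value only.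

-- ===== PORT A =====
-- the inner 'for i in range(N): if alturas[i] < max_altura: alturas[i] += 1',
-- as structural recursion on the number of indices processed (index n handled after 0..n-1).
-- pyGetD/pySetD are exact here: on Pre_ every executed subscript is in range (N = len,
-- or the loop body never runs because max == min already).
def calcFor (mx : Int) (alt : List Int) : Nat → List Int
  | 0 => alt
  | n+1 =>
    let acc := calcFor mx alt n
    let v := PySem.List.pyGetD acc (n : Int) 0
    if v < mx then PySem.List.pySetD acc (n : Int) (v + 1) else acc

-- the 'while True' loop; fuel only makes the recursion total (Python diverges outside Pre_)
def calcLoop (N : Int) : Nat → List Int → Int → Int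
  | 0, _, fases => fases
  | fuel+1, alt, fases =>
    match PySem.List.max? alt (fun x => x), PySem.List.min? alt (fun x => x) with
    | some mx, some mn =>
      if mx = mn then fases
      else calcLoop N fuel (calcFor mx alt N.toNat) (fases + 1)
    | _, _ => fases

def calcular_fases (N : Int) (alturas : List Int) : Int :=
  let fuel : Nat :=
    match PySem.List.max? alturas (fun x => x), PySem.List.min? alturas (fun x => x) with
    | some mx, some mn => (mx - mn).toNat + 1
    | _, _ => 1
  calcLoop N fuel alturas 0

-- ===== PORT B =====
def calcular_fases_alt (N : Int) (alturas : List Int) : Int :=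
  match PySem.List.max? alturas (fun x => x), PySem.List.min? alturas (fun x => x) with
  | some mx, some mn => mx - mn
  | _, _ => 0

-- ===== PRECONDITION & SPEC =====
-- Pre_ is exactly where A returns: a nonempty list with either all heights equal, or
-- N ≤ len(alturas) and every height past index N already maximal; otherwise A raises
-- ValueError (empty), IndexError (N > len, heights unequal) or loops forever (an index ≥ N
-- stays below the maximum and is never incremented).
def Pre_calcular_fases (N : Int) (alturas : List Int) : Prop :=
  alturas ≠ [] ∧
    ((N ≤ (alturas.length : Int) ∧
        ∀ y ∈ alturas.drop N.toNat, ∀ z ∈ alturas, z ≤ y) ∨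
      alturas.all (fun x => x = alturas.headI) = true)
instance (N : Int) (alturas : List Int) : Decidable (Pre_calcular_fases N alturas) := by
  unfold Pre_calcular_fases; infer_instance

def pvWitness_calcular_fases : Int × List Int := (3, [1, 2, 3])

def Spec_calcular_fases (N : Int) (alturas : List Int) (out : Int) : Prop := out = calcular_fases_alt N alturas
instance (N : Int) (alturas : List Int) (out : Int) : Decidable (Spec_calcular_fases N alturas out) := by unfold Spec_calcular_fases; infer_instance

-- ===== CLAIM (what is proved, stated in full; the proofs are below) =====
def Claim_equal_calcular_fases : Prop := ∀ (N : Int) (alturas : List Int), Dom_calcular_fases N alturas → Pre_calcular_fases N alturas → Spec_calcular_fases N alturas (calcular_fases N alturas)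


-- ===== LEMMAS AND PROOFS =====

-- the elementwise effect of one phase
def bump (mx v : Int) : Int := if v < mx then v + 1 else v

set_option maxRecDepth 4000 in
lemma calcFor_eq (mx : Int) (alt : List Int) :
    ∀ n : Nat, calcFor mx alt n = (alt.take n).map (bump mx) ++ alt.drop n := by
  intro n
  induction n with
  | zero => simp [calcFor]
  | succ n ih =>
    have hstep : calcFor mx alt (n+1)
        = (if PySem.List.pyGetD (calcFor mx alt n) (n : Int) 0 < mx
           then PySem.List.pySetD (calcFor mx alt n) (n : Int)
                  (PySem.List.pyGetD (calcFor mx alt n) (n : Int) 0 + 1)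
           else calcFor mx alt n) := rfl
    by_cases h : n < alt.length
    · have hlen : ((alt.take n).map (bump mx)).length = n := by
        simp [Nat.min_eq_left (Nat.le_of_lt h)]
      have hget : PySem.List.pyGetD (calcFor mx alt n) (n : Int) 0 = alt[n] := by
        rw [ih, PySem.List.pyGetD_natCast, List.getD_eq_getElem?_getD,
            List.getElem?_append_right (by omega)]
        simp [Nat.min_eq_left (Nat.le_of_lt h), List.getElem?_drop,
              List.getElem?_eq_getElem h]
      have hdrop : alt.drop n = alt[n] :: alt.drop (n + 1) :=
        List.drop_eq_getElem_cons h
      have htake : alt.take (n+1) = alt.take n ++ [alt[n]] := by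
        rw [List.take_add_one, List.getElem?_eq_getElem h]
        rfl
      rw [hstep, hget, ih, htake, List.map_append]
      by_cases hv : alt[n] < mx
      · rw [if_pos hv, PySem.List.pySetD_natCast, List.set_append,
            if_neg (by omega), hlen, Nat.sub_self, hdrop, List.set_cons_zero]
        simp [bump, hv]
      · rw [if_neg hv, hdrop]
        simp [bump, hv]
    · have h' : alt.length ≤ n := Nat.le_of_not_lt h
      have hcf : calcFor mx alt n = List.map (bump mx) alt := by
        rw [ih, List.take_of_length_le h', List.drop_of_length_le h', List.append_nil]
      have hlen2 : (List.map (bump mx) alt).length ≤ n := by simpa using h'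
      rw [hstep, hcf, List.take_of_length_le (by omega), List.drop_of_length_le (by omega),
          List.append_nil, PySem.List.pyGetD_natCast, PySem.List.pySetD_natCast]
      rw [List.getD_eq_getElem?_getD, List.getElem?_eq_none hlen2]
      split_ifs with hv
      · exact List.set_eq_of_length_le hlen2
      · rfl

lemma map_bump_of_all_eq (mx : Int) :
    ∀ s : List Int, (∀ y ∈ s, y = mx) → s.map (bump mx) = s := by
  intro s
  induction s with
  | nil => intro _; rfl
  | cons a s ihs =>
    intro h
    have ha : a = mx := h a (by simp)
    rw [List.map_cons, ihs fun y hy => h y (by simp [hy]), ha]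
    simp [bump]

-- if every element past position n is already mx, one pass over the first n indices
-- bumps the whole list
lemma calcFor_suffix (mx : Int) (alt : List Int) (n : Nat)
    (hsuf : ∀ y ∈ alt.drop n, y = mx) :
    calcFor mx alt n = alt.map (bump mx) := by
  rw [calcFor_eq]
  have hdrop : (alt.drop n).map (bump mx) = alt.drop n :=
    map_bump_of_all_eq mx (alt.drop n) hsuf
  calc (alt.take n).map (bump mx) ++ alt.drop n
      = (alt.take n).map (bump mx) ++ (alt.drop n).map (bump mx) := by rw [hdrop]
    _ = (alt.take n ++ alt.drop n).map (bump mx) := by rw [List.map_append]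
    _ = alt.map (bump mx) := by rw [List.take_append_drop]

-- uniqueness of the extremum value
lemma max?_unique {l : List Int} {m m' : Int}
    (h : PySem.List.max? l (fun x => x) = some m')
    (hmem : m ∈ l) (hub : ∀ y ∈ l, y ≤ m) : m' = m := by
  have h1 : ∀ y ∈ l, y ≤ m' := PySem.List.max?_isMax h
  have h2 : m' ∈ l := PySem.List.max?_mem h
  exact le_antisymm (hub m' h2) (h1 m hmem)

lemma min?_unique {l : List Int} {m m' : Int}
    (h : PySem.List.min? l (fun x => x) = some m')
    (hmem : m ∈ l) (hlb : ∀ y ∈ l, m ≤ y) : m' = m := by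
  have h1 : ∀ y ∈ l, m' ≤ y := PySem.List.min?_isMin h
  have h2 : m' ∈ l := PySem.List.min?_mem h
  exact le_antisymm (h1 m hmem) (hlb m' h2)

lemma max?_map_bump {l : List Int} {mx : Int}
    (h : PySem.List.max? l (fun x => x) = some mx) :
    PySem.List.max? (l.map (bump mx)) (fun x => x) = some mx := by
  have hub := PySem.List.max?_isMax h
  have hmem := PySem.List.max?_mem h
  have hne : l.map (bump mx) ≠ [] := by
    simp only [ne_eq, List.map_eq_nil_iff]
    exact List.ne_nil_of_mem hmem
  obtain ⟨m', hm'⟩ : ∃ m', PySem.List.max? (l.map (bump mx)) (fun x => x) = some m' := by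
    cases hm : PySem.List.max? (l.map (bump mx)) (fun x => x) with
    | none => rw [PySem.List.max?_eq_none_iff] at hm; exact absurd hm hne
    | some m' => exact ⟨m', rfl⟩
  have h1 : mx ∈ l.map (bump mx) := by
    have := List.mem_map_of_mem (f := bump mx) hmem
    simpa [bump] using this
  have h2 : ∀ y ∈ l.map (bump mx), y ≤ mx := by
    intro y hy
    obtain ⟨z, hz, rfl⟩ := List.mem_map.mp hy
    have := hub z hz
    by_cases hlt : z < mx <;> simp [bump, hlt] <;> omega
  rw [hm', max?_unique hm' h1 h2]

lemma min?_map_bump {l : List Int} {mx mn : Int}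
    (hmx : PySem.List.max? l (fun x => x) = some mx)
    (h : PySem.List.min? l (fun x => x) = some mn) (hlt : mn < mx) :
    PySem.List.min? (l.map (bump mx)) (fun x => x) = some (mn + 1) := by
  have hlb := PySem.List.min?_isMin h
  have hub := PySem.List.max?_isMax hmx
  have hmem := PySem.List.min?_mem h
  have hne : l.map (bump mx) ≠ [] := by
    simp only [ne_eq, List.map_eq_nil_iff]
    exact List.ne_nil_of_mem hmem
  obtain ⟨m', hm'⟩ : ∃ m', PySem.List.min? (l.map (bump mx)) (fun x => x) = some m' := by
    cases hm : PySem.List.min? (l.map (bump mx)) (fun x => x) with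
    | none => rw [PySem.List.min?_eq_none_iff] at hm; exact absurd hm hne
    | some m' => exact ⟨m', rfl⟩
  have h1 : mn + 1 ∈ l.map (bump mx) := by
    have := List.mem_map_of_mem (f := bump mx) hmem
    simpa [bump, hlt] using this
  have h2 : ∀ y ∈ l.map (bump mx), mn + 1 ≤ y := by
    intro y hy
    obtain ⟨z, hz, rfl⟩ := List.mem_map.mp hy
    have hz1 := hlb z hz
    have hz2 := hub z hz
    by_cases hzlt : z < mx <;> simp [bump, hzlt] <;> omega
  rw [hm', min?_unique hm' h1 h2]

lemma pv_min_le_max {l : List Int} {mx mn : Int}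
    (hmx : PySem.List.max? l (fun x => x) = some mx)
    (hmn : PySem.List.min? l (fun x => x) = some mn) : mn ≤ mx :=
  PySem.List.max?_isMax hmx mn (PySem.List.min?_mem hmn)

lemma calcLoop_closed (N : Int) :
    ∀ (d fuel : Nat) (l : List Int) (fases mx mn : Int),
      N ≤ (l.length : Int) →
      (∀ y ∈ l.drop N.toNat, y = mx) →
      PySem.List.max? l (fun x => x) = some mx →
      PySem.List.min? l (fun x => x) = some mn →
      (mx - mn).toNat = d → d < fuel →
      calcLoop N fuel l fases = fases + (mx - mn) := by
  intro d
  induction d with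
  | zero =>
    intro fuel l fases mx mn hN hsuf hmx hmn hd hf
    have hle := pv_min_le_max hmx hmn
    have heq : mx = mn := by omega
    obtain ⟨f, rfl⟩ : ∃ f, fuel = f + 1 := ⟨fuel - 1, by omega⟩
    subst heq
    simp [calcLoop, hmx, hmn]
  | succ d ih =>
    intro fuel l fases mx mn hN hsuf hmx hmn hd hf
    have hle := pv_min_le_max hmx hmn
    have hlt : mn < mx := by omega
    obtain ⟨f, rfl⟩ : ∃ f, fuel = f + 1 := ⟨fuel - 1, by omega⟩
    have hne : mx ≠ mn := by omega
    simp only [calcLoop, hmx, hmn, if_neg hne, calcFor_suffix mx l N.toNat hsuf]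
    have hN2 : N ≤ ((l.map (bump mx)).length : Int) := by simpa using hN
    have hsuf2 : ∀ y ∈ (l.map (bump mx)).drop N.toNat, y = mx := by
      intro y hy
      rw [← List.map_drop] at hy
      obtain ⟨z, hz, rfl⟩ := List.mem_map.mp hy
      rw [hsuf z hz]
      simp [bump]
    rw [ih f (l.map (bump mx)) (fases + 1) mx (mn + 1) hN2 hsuf2
        (max?_map_bump hmx) (min?_map_bump hmx hmn hlt) (by omega) (by omega)]
    ring

lemma foldl_max_const {c : Int} : ∀ t : List Int, (∀ y ∈ t, y = c) → t.foldl max c = c := by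
  intro t
  induction t with
  | nil => simp
  | cons a t ih =>
    intro h
    have ha : a = c := h a (by simp)
    simp only [List.foldl_cons, ha, max_self]
    exact ih fun y hy => h y (by simp [hy])

lemma foldl_min_const {c : Int} : ∀ t : List Int, (∀ y ∈ t, y = c) → t.foldl min c = c := by
  intro t
  induction t with
  | nil => simp
  | cons a t ih =>
    intro h
    have ha : a = c := h a (by simp)
    simp only [List.foldl_cons, ha, min_self]
    exact ih fun y hy => h y (by simp [hy])

-- ===== VERDICT (by name: the statement is the Claim_ definition above) =====
theorem calcular_fases_spec : Claim_equal_calcular_fases := by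
  intro N alturas _ hpre
  obtain ⟨hne, hcase⟩ := hpre
  obtain ⟨x, t, rfl⟩ : ∃ x t, alturas = x :: t := by
    cases alturas with
    | nil => exact absurd rfl hne
    | cons x t => exact ⟨x, t, rfl⟩
  unfold Spec_calcular_fases
  rcases hcase with ⟨hN, hsu⟩ | hall
  · have hmx := PySem.List.max?_id_cons (x := x) (t := t)
    have hmn := PySem.List.min?_id_cons (x := x) (t := t)
    have hle := pv_min_le_max hmx hmn
    have hsuf : ∀ y ∈ (x :: t).drop N.toNat, y = t.foldl max x := by
      intro y hy
      have h1 : y ≤ t.foldl max x :=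
        PySem.List.max?_isMax hmx y (List.mem_of_mem_drop hy)
      have h2 : t.foldl max x ≤ y := hsu y hy _ (PySem.List.max?_mem hmx)
      omega
    unfold calcular_fases calcular_fases_alt
    rw [hmx, hmn]
    simp only
    rw [calcLoop_closed N ((t.foldl max x - t.foldl min x).toNat)
        ((t.foldl max x - t.foldl min x).toNat + 1) (x :: t) 0 _ _ hN hsuf hmx hmn rfl
        (by omega)]
    omega
  · -- all elements equal the head: max = min, A breaks immediately, B returns 0
    have hall2 : ∀ y ∈ t, y = x := by
      intro y hy
      have := List.all_eq_true.mp hall y (by simp [hy])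
      simpa [List.headI] using this
    have hmx := PySem.List.max?_id_cons (x := x) (t := t)
    have hmn := PySem.List.min?_id_cons (x := x) (t := t)
    have hmax : t.foldl max x = x := foldl_max_const t hall2
    have hmin : t.foldl min x = x := foldl_min_const t hall2
    unfold calcular_fases calcular_fases_alt
    rw [hmx, hmn, hmax, hmin]
    simp [calcLoop, hmx, hmn, hmax, hmin]
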